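-- pv_equiv track=rewrite | github.com/catmaim/atmprovice | advanced_syntax_check.py | find_syntax_issues
-- ===== SOURCE A (Python) =====
-- def find_syntax_issues(s):
--     i = 0
--     stack = []
--     issues = []
--     line = 1
--     col = 1
--
--     while i < len(s):
--         c = s[i]
--
--         if c == '\n':
--             line += 1
--             col = 1
--         else:
--             col += 1
--
--         if not stack:
--             if c in ['"', "'", '`']:
--                 stack.append((c, line, col, i))
--         else:
--             top_q, top_l, top_c, top_i = stack[-1]
--             if c == top_q:
--                 # Check for escape
--                 bs_count = 0
--                 j = i - 1
--                 while j >= 0 and s[j] == '\\':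
--                     bs_count += 1
--                     j -= 1
--                 if bs_count % 2 == 0:
--                     stack.pop()
--             elif c == '\n' and top_q != '`':
--                 # Unterminated string on line
--                 issues.append(f"Unterminated {top_q} at line {top_l}, col {top_c}")
--                 stack.pop()
--
--         i += 1
--
--     for q, l, c, _ in stack:
--         issues.append(f"Unclosed {q} starting at line {l}, col {c}")
--     return issues
-- ===== SOURCE B (Python) =====
-- def find_syntax_issues(s):
--     issues = []
--     open_q = None          # at most one quote can be open (push only when empty)
--     line, col = 1, 1
--     bs_run = 0             # count of consecutive backslashes strictly before current char
--     for c in s: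
--         if c == '\n':
--             line += 1
--             col = 1
--         else:
--             col += 1
--         if open_q is None:
--             if c in '"\'`':
--                 open_q = (c, line, col)
--         else:
--             q, l, cc = open_q
--             if c == q:
--                 if bs_run % 2 == 0:
--                     open_q = None
--             elif c == '\n' and q != '`':
--                 issues.append(f"Unterminated {q} at line {l}, col {cc}")
--                 open_q = None
--         bs_run = bs_run + 1 if c == '\\' else 0
--     if open_q is not None:
--         q, l, cc = open_q
--         issues.append(f"Unclosed {q} starting at line {l}, col {cc}")
--     return issues
-- ===== Notes on version B (the rewrite author's own statement) =====
-- stated objective: faster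
-- what changed: Single forward pass: a running backslash counter replaces the backward while-scan at each closing quote, and since a quote is pushed only when the stack is empty the stack is replaced by a single optional open-quote record.
import Mathlib
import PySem

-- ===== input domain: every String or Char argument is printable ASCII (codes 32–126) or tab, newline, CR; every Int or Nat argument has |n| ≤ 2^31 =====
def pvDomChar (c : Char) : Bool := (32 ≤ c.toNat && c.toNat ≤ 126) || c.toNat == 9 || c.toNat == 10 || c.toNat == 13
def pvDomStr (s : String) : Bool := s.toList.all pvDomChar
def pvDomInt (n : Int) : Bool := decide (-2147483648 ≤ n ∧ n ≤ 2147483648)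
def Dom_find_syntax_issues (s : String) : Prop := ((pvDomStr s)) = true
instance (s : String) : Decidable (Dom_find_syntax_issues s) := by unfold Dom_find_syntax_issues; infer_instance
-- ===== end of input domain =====

-- B replaces A's backward backslash-scan at each closing quote with a running counter,
-- and the (at-most-one-element) stack with an optional open-quote record: one O(n) pass.

-- message builders shared by both ports (both Pythons build the identical f-strings)
def msgUnterminated (q : Char) (l c : Int) : String :=
  "Unterminated " ++ String.singleton q ++ " at line " ++ PySem.Int.toStr l ++ ", col " ++ PySem.Int.toStr c

def msgUnclosed (q : Char) (l c : Int) : String :=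
  "Unclosed " ++ String.singleton q ++ " starting at line " ++ PySem.Int.toStr l ++ ", col " ++ PySem.Int.toStr c

-- ===== PORT A =====
-- A's backward while-loop 'j = i-1; while j >= 0 and s[j] == "\\"', given the reversed prefix s[:i]
def bsScanA : List Char → Nat
  | [] => 0
  | c :: rest => if c = '\\' then bsScanA rest + 1 else 0

-- A's main while-loop; prev is the reversed prefix s[:i], stack entries are (q, line, col, i)
def loopA : List Char → List Char → List (Char × Int × Int × Int) → List String → Int → Int → Int → List String
  | _, [], stack, issues, _, _, _ =>
      issues ++ stack.map (fun t => msgUnclosed t.1 t.2.1 t.2.2.1)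
  | prev, c :: rest, stack, issues, line, col, i =>
      let line' := if c = '\n' then line + 1 else line
      let col'  := if c = '\n' then 1 else col + 1
      match stack with
      | [] =>
          let stack' := if c = '"' ∨ c = '\'' ∨ c = '`' then [(c, line', col', i)] else []
          loopA (c :: prev) rest stack' issues line' col' (i + 1)
      | (tq, tl, tc, ti) :: tail =>
          if c = tq then
            let stack' := if bsScanA prev % 2 = 0 then tail else (tq, tl, tc, ti) :: tail
            loopA (c :: prev) rest stack' issues line' col' (i + 1)
          else if c = '\n' ∧ tq ≠ '`' then
            loopA (c :: prev) rest tail (issues ++ [msgUnterminated tq tl tc]) line' col' (i + 1)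
          else
            loopA (c :: prev) rest ((tq, tl, tc, ti) :: tail) issues line' col' (i + 1)

def find_syntax_issues (s : String) : List String :=
  loopA [] s.toList [] [] 1 1 0

-- ===== PORT B =====
-- B's single pass: open_q is the optional open quote, bsRun the run of backslashes just before c
def loopB : List Char → Option (Char × Int × Int) → List String → Int → Int → Int → List String
  | [], openQ, issues, _, _, _ =>
      match openQ with
      | none => issues
      | some (q, l, cc) => issues ++ [msgUnclosed q l cc]
  | c :: rest, openQ, issues, line, col, bsRun =>
      let line' := if c = '\n' then line + 1 else line
      let col'  := if c = '\n' then 1 else col + 1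
      let st :=
        match openQ with
        | none =>
            (if c = '"' ∨ c = '\'' ∨ c = '`' then some (c, line', col') else none, issues)
        | some (q, l, cc) =>
            if c = q then
              (if PySem.Int.mod bsRun 2 = 0 then none else some (q, l, cc), issues)
            else if c = '\n' ∧ q ≠ '`' then
              (none, issues ++ [msgUnterminated q l cc])
            else
              (some (q, l, cc), issues)
      loopB rest st.1 st.2 line' col' (if c = '\\' then bsRun + 1 else 0)

def find_syntax_issues_alt (s : String) : List String :=
  loopB s.toList none [] 1 1 0

-- ===== PRECONDITION & SPEC =====
def Spec_find_syntax_issues (s : String) (out : List String) : Prop := out = find_syntax_issues_alt s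
instance (s : String) (out : List String) : Decidable (Spec_find_syntax_issues s out) := by unfold Spec_find_syntax_issues; infer_instance

-- ===== CLAIM (what is proved, stated in full; the proofs are below) =====
def Claim_equal_find_syntax_issues : Prop := ∀ (s : String), Dom_find_syntax_issues s → Spec_find_syntax_issues s (find_syntax_issues s)

-- ===== LEMMAS AND PROOFS =====

-- relation between A's stack (length ≤ 1 is invariant) and B's option
def RelStack (stack : List (Char × Int × Int × Int)) (openQ : Option (Char × Int × Int)) : Prop :=
  match stack, openQ with
  | [], none => True
  | [(q, l, c, _)], some (q', l', c') => q = q' ∧ l = l' ∧ c = c'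
  | _, _ => False

lemma bsRun_step (prev : List Char) (c : Char) :
    ((bsScanA (c :: prev) : Nat) : Int)
      = (if c = '\\' then ((bsScanA prev : Nat) : Int) + 1 else 0) := by
  by_cases h : c = '\\' <;> simp [bsScanA, h]

lemma mod_two_cast (n : Nat) : (PySem.Int.mod ((n : Nat) : Int) 2 = 0) ↔ n % 2 = 0 := by
  simp
  omega

lemma loop_eq : ∀ (rest prev : List Char) (stack : List (Char × Int × Int × Int))
    (openQ : Option (Char × Int × Int)) (issues : List String) (line col i : Int),
    RelStack stack openQ →
    loopA prev rest stack issues line col i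
      = loopB rest openQ issues line col ((bsScanA prev : Nat) : Int) := by
  intro rest
  induction rest with
  | nil =>
      intro prev stack openQ issues line col i hrel
      match stack, openQ with
      | [], none => simp [loopA, loopB]
      | [(q, l, c, ti)], some (q', l', c') =>
          obtain ⟨h1, h2, h3⟩ := hrel
          subst h1; subst h2; subst h3
          simp [loopA, loopB]
      | [], some _ => exact absurd hrel (by simp [RelStack])
      | (_ :: _), none => exact absurd hrel (by simp [RelStack])
      | (_ :: _ :: _), some _ => exact absurd hrel (by simp [RelStack])
  | cons c rest ih =>
      intro prev stack openQ issues line col i hrel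
      match stack, openQ with
      | [], none =>
          simp only [loopA, loopB]
          rw [ih (c :: prev)]
          · rw [bsRun_step]
          · by_cases h : c = '"' ∨ c = '\'' ∨ c = '`' <;> simp [RelStack, h]
      | [(q, l, cc, ti)], some (q', l', cc') =>
          obtain ⟨h1, h2, h3⟩ := hrel
          subst h1; subst h2; subst h3
          simp only [loopA, loopB]
          by_cases hc : c = q
          · subst hc
            have hmod : (PySem.Int.mod ((bsScanA prev : Nat) : Int) 2 = 0) ↔ bsScanA prev % 2 = 0 :=
              mod_two_cast _
            by_cases hb : bsScanA prev % 2 = 0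
            · simp only [if_true, if_pos hb, if_pos (hmod.mpr hb)]
              rw [ih (c :: prev) [] none _ _ _ _ (by simp [RelStack]), bsRun_step]
            · simp only [if_true, if_neg hb, if_neg (fun h => hb (hmod.mp h))]
              rw [ih (c :: prev) [(c, l, cc, ti)] (some (c, l, cc)) _ _ _ _ (by simp [RelStack]),
                bsRun_step]
          · simp only [if_neg hc]
            by_cases hn : c = '\n' ∧ q ≠ '`'
            · simp only [if_pos hn]
              rw [ih (c :: prev)] ; · rw [bsRun_step]
              simp [RelStack]
            · simp only [if_neg hn]
              rw [ih (c :: prev)] ; · rw [bsRun_step]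
              simp [RelStack]
      | [], some _ => exact absurd hrel (by simp [RelStack])
      | (_ :: _), none => exact absurd hrel (by simp [RelStack])
      | (_ :: _ :: _), some _ => exact absurd hrel (by simp [RelStack])

-- ===== VERDICT (by name: the statement is the Claim_ definition above) =====
theorem find_syntax_issues_spec : Claim_equal_find_syntax_issues := by
  intro s _
  unfold Spec_find_syntax_issues find_syntax_issues find_syntax_issues_alt
  have h := loop_eq s.toList [] [] none [] 1 1 0 (by simp [RelStack])
  simpa [bsScanA] using h
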